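-- pv_equiv track=rewrite | github.com/eZansiEdgeAI/ezansieedgeai | tools/agent-orchestration/pr-constitution-generator.py | _generate_principle_checks
-- ===== SOURCE A (Python) =====
-- from typing import Dict, Any, List
--
-- def _generate_principle_checks(principle: str) -> List[str]:
--     """
--     Generate validation checks for a principle.
--     """
--     principle_lower = principle.lower()
--     checks = []
--
--     # Generic check - always include
--     checks.append(f"Implementation aligns with principle")
--
--     # Specific checks based on keywords
--     if any(keyword in principle_lower for keyword in ['offline', 'connectivity', 'network']):
--         checks.extend([
--             "Feature works without network connectivity",
--             "Graceful handling of network failures"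
--         ])
--     elif any(keyword in principle_lower for keyword in ['mobile', 'phone', 'device']):
--         checks.extend([
--             "Mobile-friendly implementation",
--             "Works on target mobile devices"
--         ])
--     elif any(keyword in principle_lower for keyword in ['simple', 'simplicity', 'easy']):
--         checks.extend([
--             "Solution is as simple as possible",
--             "No unnecessary complexity"
--         ])
--     elif any(keyword in principle_lower for keyword in ['secure', 'security', 'privacy', 'protected']):
--         checks.extend([
--             "Security best practices followed",
--             "No known vulnerabilities"
--         ])
--     elif any(keyword in principle_lower for keyword in ['performance', 'fast', 'speed', 'quick']):
--         checks.extend([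
--             "Performance targets met",
--             "No performance regressions"
--         ])
--     elif any(keyword in principle_lower for keyword in ['reliable', 'reliability', 'consistent', 'resilient']):
--         checks.extend([
--             "Error handling implemented",
--             "Graceful degradation in edge cases"
--         ])
--     elif any(keyword in principle_lower for keyword in ['accessible', 'accessibility', 'anyone', 'anywhere']):
--         checks.extend([
--             "Works in target environments",
--             "No unnecessary barriers"
--         ])
--     elif any(keyword in principle_lower for keyword in ['open', 'transparent', 'interoperable']):
--         checks.extend([
--             "Uses open standards where applicable",
--             "Documented interfaces"
--         ])
--     else:
--         # Default checks for unrecognized principles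
--         checks.extend([
--             "Principle considered in design",
--             "No violations of principle"
--         ])
--
--     return checks[:4]  # Max 4 checks per principle
-- ===== SOURCE B (Python) =====
-- # Flat keyword->rule-index map; the rule is chosen as the MINIMUM index among all
-- # matching keywords (no cascade, no first-match group loop), then looked up in a table.
-- _KEYWORD_RULE = {
--     'offline': 0, 'connectivity': 0, 'network': 0,
--     'mobile': 1, 'phone': 1, 'device': 1,
--     'simple': 2, 'simplicity': 2, 'easy': 2,
--     'secure': 3, 'security': 3, 'privacy': 3, 'protected': 3,
--     'performance': 4, 'fast': 4, 'speed': 4, 'quick': 4,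
--     'reliable': 5, 'reliability': 5, 'consistent': 5, 'resilient': 5,
--     'accessible': 6, 'accessibility': 6, 'anyone': 6, 'anywhere': 6,
--     'open': 7, 'transparent': 7, 'interoperable': 7,
-- }
-- _TABLE = [
--     ["Feature works without network connectivity", "Graceful handling of network failures"],
--     ["Mobile-friendly implementation", "Works on target mobile devices"],
--     ["Solution is as simple as possible", "No unnecessary complexity"],
--     ["Security best practices followed", "No known vulnerabilities"],
--     ["Performance targets met", "No performance regressions"],
--     ["Error handling implemented", "Graceful degradation in edge cases"],
--     ["Works in target environments", "No unnecessary barriers"],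
--     ["Uses open standards where applicable", "Documented interfaces"],
--     ["Principle considered in design", "No violations of principle"],
-- ]
--
-- def _generate_principle_checks(principle: str):
--     pl = principle.lower()
--     idx = min((i for k, i in _KEYWORD_RULE.items() if k in pl), default=len(_TABLE) - 1)
--     return (["Implementation aligns with principle"] + _TABLE[idx])[:4]
-- ===== Notes on version B (the rewrite author's own statement) =====
-- stated objective: idiomatic
-- what changed: Replaces the eight-branch if-elif cascade over keyword groups with a flat keyword-to-rule-index dict: all matching keywords are collected and the rule with the MINIMUM index is selected (min with a default) and looked up in a table, instead of first-match short-circuit branching.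
import Mathlib
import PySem

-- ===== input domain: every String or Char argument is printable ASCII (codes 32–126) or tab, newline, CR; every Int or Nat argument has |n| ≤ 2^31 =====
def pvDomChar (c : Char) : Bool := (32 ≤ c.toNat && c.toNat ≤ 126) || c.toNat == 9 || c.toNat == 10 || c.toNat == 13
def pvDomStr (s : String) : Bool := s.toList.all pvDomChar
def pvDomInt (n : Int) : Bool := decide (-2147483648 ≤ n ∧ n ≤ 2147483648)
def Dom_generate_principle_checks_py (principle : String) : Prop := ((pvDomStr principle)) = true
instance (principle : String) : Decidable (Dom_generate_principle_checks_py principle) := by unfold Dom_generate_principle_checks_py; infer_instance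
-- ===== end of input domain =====

-- B replaces A's eight-branch if-elif cascade by a flat keyword->rule-index map: the rule is
-- the MINIMUM index among all matching keywords, looked up in a table (more idiomatic; same cost).


-- ===== PORT A =====
def generate_principle_checks_py (principle : String) : List String :=
  let principle_lower := PySem.Str.lower principle
  let checks : List String := []
  let checks := checks ++ ["Implementation aligns with principle"]
  let checks :=
    if ["offline", "connectivity", "network"].any (fun k => PySem.Str.isIn k principle_lower) then
      checks ++ ["Feature works without network connectivity", "Graceful handling of network failures"]
    else if ["mobile", "phone", "device"].any (fun k => PySem.Str.isIn k principle_lower) then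
      checks ++ ["Mobile-friendly implementation", "Works on target mobile devices"]
    else if ["simple", "simplicity", "easy"].any (fun k => PySem.Str.isIn k principle_lower) then
      checks ++ ["Solution is as simple as possible", "No unnecessary complexity"]
    else if ["secure", "security", "privacy", "protected"].any (fun k => PySem.Str.isIn k principle_lower) then
      checks ++ ["Security best practices followed", "No known vulnerabilities"]
    else if ["performance", "fast", "speed", "quick"].any (fun k => PySem.Str.isIn k principle_lower) then
      checks ++ ["Performance targets met", "No performance regressions"]
    else if ["reliable", "reliability", "consistent", "resilient"].any (fun k => PySem.Str.isIn k principle_lower) then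
      checks ++ ["Error handling implemented", "Graceful degradation in edge cases"]
    else if ["accessible", "accessibility", "anyone", "anywhere"].any (fun k => PySem.Str.isIn k principle_lower) then
      checks ++ ["Works in target environments", "No unnecessary barriers"]
    else if ["open", "transparent", "interoperable"].any (fun k => PySem.Str.isIn k principle_lower) then
      checks ++ ["Uses open standards where applicable", "Documented interfaces"]
    else
      checks ++ ["Principle considered in design", "No violations of principle"]
  PySem.List.slice checks none (some 4)

-- ===== PORT B =====
-- the flat keyword -> rule-index dict, in insertion order
def pvKeywordRule : List (String × Nat) :=
  [ ("offline", 0), ("connectivity", 0), ("network", 0),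
    ("mobile", 1), ("phone", 1), ("device", 1),
    ("simple", 2), ("simplicity", 2), ("easy", 2),
    ("secure", 3), ("security", 3), ("privacy", 3), ("protected", 3),
    ("performance", 4), ("fast", 4), ("speed", 4), ("quick", 4),
    ("reliable", 5), ("reliability", 5), ("consistent", 5), ("resilient", 5),
    ("accessible", 6), ("accessibility", 6), ("anyone", 6), ("anywhere", 6),
    ("open", 7), ("transparent", 7), ("interoperable", 7) ]

def pvTable : List (List String) :=
  [ ["Feature works without network connectivity", "Graceful handling of network failures"],
    ["Mobile-friendly implementation", "Works on target mobile devices"],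
    ["Solution is as simple as possible", "No unnecessary complexity"],
    ["Security best practices followed", "No known vulnerabilities"],
    ["Performance targets met", "No performance regressions"],
    ["Error handling implemented", "Graceful degradation in edge cases"],
    ["Works in target environments", "No unnecessary barriers"],
    ["Uses open standards where applicable", "Documented interfaces"],
    ["Principle considered in design", "No violations of principle"] ]

-- the generator '(i for k, i in _KEYWORD_RULE.items() if k in pl)'
def pvHits (pl : String) : List Nat :=
  pvKeywordRule.filterMap (fun ki => if PySem.Str.isIn ki.1 pl then some ki.2 else none)

def generate_principle_checks_py_alt (principle : String) : List String :=
  let pl := PySem.Str.lower principle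
  let idx := (PySem.List.min? (pvHits pl) (fun i => i)).getD (pvTable.length - 1)
  PySem.List.slice (["Implementation aligns with principle"] ++ pvTable.getD idx []) none (some 4)

-- ===== PRECONDITION & SPEC =====
def Spec_generate_principle_checks_py (principle : String) (out : List String) : Prop := out = generate_principle_checks_py_alt principle
instance (principle : String) (out : List String) : Decidable (Spec_generate_principle_checks_py principle out) := by unfold Spec_generate_principle_checks_py; infer_instance

-- ===== CLAIM (what is proved, stated in full; the proofs are below) =====
def Claim_equal_generate_principle_checks_py : Prop := ∀ (principle : String), Dom_generate_principle_checks_py principle → Spec_generate_principle_checks_py principle (generate_principle_checks_py principle)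

-- ===== LEMMAS AND PROOFS =====

lemma hits_le (pl : String) : ∀ b ∈ pvHits pl, b ≤ 7 := by
  intro b hb
  simp only [pvHits, List.mem_filterMap] at hb
  obtain ⟨a, ha, hs⟩ := hb
  have h2 : a.2 = b := by split at hs <;> simp_all
  subst h2
  fin_cases ha <;> simp

lemma mem_hits_0 (pl : String) : 0 ∈ pvHits pl ↔ (["offline", "connectivity", "network"].any (fun k => PySem.Str.isIn k pl)) = true := by
  simp [pvHits, pvKeywordRule, List.mem_filterMap, Option.ite_none_right_eq_some]

lemma mem_hits_1 (pl : String) : 1 ∈ pvHits pl ↔ (["mobile", "phone", "device"].any (fun k => PySem.Str.isIn k pl)) = true := by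
  simp [pvHits, pvKeywordRule, List.mem_filterMap, Option.ite_none_right_eq_some]

lemma mem_hits_2 (pl : String) : 2 ∈ pvHits pl ↔ (["simple", "simplicity", "easy"].any (fun k => PySem.Str.isIn k pl)) = true := by
  simp [pvHits, pvKeywordRule, List.mem_filterMap, Option.ite_none_right_eq_some]

lemma mem_hits_3 (pl : String) : 3 ∈ pvHits pl ↔ (["secure", "security", "privacy", "protected"].any (fun k => PySem.Str.isIn k pl)) = true := by
  simp [pvHits, pvKeywordRule, List.mem_filterMap, Option.ite_none_right_eq_some]

lemma mem_hits_4 (pl : String) : 4 ∈ pvHits pl ↔ (["performance", "fast", "speed", "quick"].any (fun k => PySem.Str.isIn k pl)) = true := by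
  simp [pvHits, pvKeywordRule, List.mem_filterMap, Option.ite_none_right_eq_some]

lemma mem_hits_5 (pl : String) : 5 ∈ pvHits pl ↔ (["reliable", "reliability", "consistent", "resilient"].any (fun k => PySem.Str.isIn k pl)) = true := by
  simp [pvHits, pvKeywordRule, List.mem_filterMap, Option.ite_none_right_eq_some]

lemma mem_hits_6 (pl : String) : 6 ∈ pvHits pl ↔ (["accessible", "accessibility", "anyone", "anywhere"].any (fun k => PySem.Str.isIn k pl)) = true := by
  simp [pvHits, pvKeywordRule, List.mem_filterMap, Option.ite_none_right_eq_some]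

lemma mem_hits_7 (pl : String) : 7 ∈ pvHits pl ↔ (["open", "transparent", "interoperable"].any (fun k => PySem.Str.isIn k pl)) = true := by
  simp [pvHits, pvKeywordRule, List.mem_filterMap, Option.ite_none_right_eq_some]

lemma min_getD_eq (l : List Nat) (n d : Nat) (hmem : n ∈ l) (hlow : ∀ j ∈ l, n ≤ j) :
    (PySem.List.min? l (fun i => i)).getD d = n := by
  cases h : PySem.List.min? l (fun i => i) with
  | none =>
      rw [PySem.List.min?_eq_none_iff] at h
      subst h; cases hmem
  | some m =>
      have hm := PySem.List.min?_mem h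
      have hmin := PySem.List.min?_isMin h n hmem
      have := hlow m hm
      simp only [Option.getD_some]
      omega

-- ===== VERDICT (by name: the statement is the Claim_ definition above) =====
set_option maxHeartbeats 2000000 in
theorem generate_principle_checks_py_spec : Claim_equal_generate_principle_checks_py := by
  intro principle _
  unfold Spec_generate_principle_checks_py generate_principle_checks_py generate_principle_checks_py_alt
  set pl := PySem.Str.lower principle with hpl
  dsimp only
  by_cases h0 : (["offline", "connectivity", "network"].any (fun k => PySem.Str.isIn k pl)) = true
  · rw [min_getD_eq (pvHits pl) 0 _ ((mem_hits_0 pl).mpr h0)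
      (fun j _ => Nat.zero_le j)]
    rw [if_pos h0]
    rfl
  ·
    by_cases h1 : (["mobile", "phone", "device"].any (fun k => PySem.Str.isIn k pl)) = true
    · rw [min_getD_eq (pvHits pl) 1 _ ((mem_hits_1 pl).mpr h1)
        (by intro j hj; by_contra hlt; rw [Nat.not_le] at hlt; interval_cases j
            all_goals first | exact h0 ((mem_hits_0 pl).mp hj))]
      rw [if_neg h0, if_pos h1]
      rfl
    ·
      by_cases h2 : (["simple", "simplicity", "easy"].any (fun k => PySem.Str.isIn k pl)) = true
      · rw [min_getD_eq (pvHits pl) 2 _ ((mem_hits_2 pl).mpr h2)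
          (by intro j hj; by_contra hlt; rw [Nat.not_le] at hlt; interval_cases j
              all_goals first | exact h0 ((mem_hits_0 pl).mp hj) | exact h1 ((mem_hits_1 pl).mp hj))]
        rw [if_neg h0, if_neg h1, if_pos h2]
        rfl
      ·
        by_cases h3 : (["secure", "security", "privacy", "protected"].any (fun k => PySem.Str.isIn k pl)) = true
        · rw [min_getD_eq (pvHits pl) 3 _ ((mem_hits_3 pl).mpr h3)
            (by intro j hj; by_contra hlt; rw [Nat.not_le] at hlt; interval_cases j
                all_goals first | exact h0 ((mem_hits_0 pl).mp hj) | exact h1 ((mem_hits_1 pl).mp hj) | exact h2 ((mem_hits_2 pl).mp hj))]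
          rw [if_neg h0, if_neg h1, if_neg h2, if_pos h3]
          rfl
        ·
          by_cases h4 : (["performance", "fast", "speed", "quick"].any (fun k => PySem.Str.isIn k pl)) = true
          · rw [min_getD_eq (pvHits pl) 4 _ ((mem_hits_4 pl).mpr h4)
              (by intro j hj; by_contra hlt; rw [Nat.not_le] at hlt; interval_cases j
                  all_goals first | exact h0 ((mem_hits_0 pl).mp hj) | exact h1 ((mem_hits_1 pl).mp hj) | exact h2 ((mem_hits_2 pl).mp hj) | exact h3 ((mem_hits_3 pl).mp hj))]
            rw [if_neg h0, if_neg h1, if_neg h2, if_neg h3, if_pos h4]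
            rfl
          ·
            by_cases h5 : (["reliable", "reliability", "consistent", "resilient"].any (fun k => PySem.Str.isIn k pl)) = true
            · rw [min_getD_eq (pvHits pl) 5 _ ((mem_hits_5 pl).mpr h5)
                (by intro j hj; by_contra hlt; rw [Nat.not_le] at hlt; interval_cases j
                    all_goals first | exact h0 ((mem_hits_0 pl).mp hj) | exact h1 ((mem_hits_1 pl).mp hj) | exact h2 ((mem_hits_2 pl).mp hj) | exact h3 ((mem_hits_3 pl).mp hj) | exact h4 ((mem_hits_4 pl).mp hj))]
              rw [if_neg h0, if_neg h1, if_neg h2, if_neg h3, if_neg h4, if_pos h5]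
              rfl
            ·
              by_cases h6 : (["accessible", "accessibility", "anyone", "anywhere"].any (fun k => PySem.Str.isIn k pl)) = true
              · rw [min_getD_eq (pvHits pl) 6 _ ((mem_hits_6 pl).mpr h6)
                  (by intro j hj; by_contra hlt; rw [Nat.not_le] at hlt; interval_cases j
                      all_goals first | exact h0 ((mem_hits_0 pl).mp hj) | exact h1 ((mem_hits_1 pl).mp hj) | exact h2 ((mem_hits_2 pl).mp hj) | exact h3 ((mem_hits_3 pl).mp hj) | exact h4 ((mem_hits_4 pl).mp hj) | exact h5 ((mem_hits_5 pl).mp hj))]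
                rw [if_neg h0, if_neg h1, if_neg h2, if_neg h3, if_neg h4, if_neg h5, if_pos h6]
                rfl
              ·
                by_cases h7 : (["open", "transparent", "interoperable"].any (fun k => PySem.Str.isIn k pl)) = true
                · rw [min_getD_eq (pvHits pl) 7 _ ((mem_hits_7 pl).mpr h7)
                    (by intro j hj; by_contra hlt; rw [Nat.not_le] at hlt; interval_cases j
                        all_goals first | exact h0 ((mem_hits_0 pl).mp hj) | exact h1 ((mem_hits_1 pl).mp hj) | exact h2 ((mem_hits_2 pl).mp hj) | exact h3 ((mem_hits_3 pl).mp hj) | exact h4 ((mem_hits_4 pl).mp hj) | exact h5 ((mem_hits_5 pl).mp hj) | exact h6 ((mem_hits_6 pl).mp hj))]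
                  rw [if_neg h0, if_neg h1, if_neg h2, if_neg h3, if_neg h4, if_neg h5, if_neg h6, if_pos h7]
                  rfl
                ·
                  have hnil : pvHits pl = [] := by
                    rw [List.eq_nil_iff_forall_not_mem]
                    intro b hb
                    have hble := hits_le pl b hb
                    interval_cases b
                    all_goals first | exact h0 ((mem_hits_0 pl).mp hb) | exact h1 ((mem_hits_1 pl).mp hb) | exact h2 ((mem_hits_2 pl).mp hb) | exact h3 ((mem_hits_3 pl).mp hb) | exact h4 ((mem_hits_4 pl).mp hb) | exact h5 ((mem_hits_5 pl).mp hb) | exact h6 ((mem_hits_6 pl).mp hb) | exact h7 ((mem_hits_7 pl).mp hb)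
                  rw [hnil, Iff.mpr (PySem.List.min?_eq_none_iff [] (fun i => i)) rfl]
                  rw [if_neg h0, if_neg h1, if_neg h2, if_neg h3, if_neg h4, if_neg h5, if_neg h6, if_neg h7]
                  rfl
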